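-- pv_equiv track=rewrite | github.com/prophet-raytar/order-to-cash-graph | backend/etl_scripts/enrich.py | _dedupe_addresses
-- ===== SOURCE A (Python) =====
-- def _dedupe_addresses(rows):
--     """Keep one address row per business partner (prefer rows with city populated)."""
--     by_bp = {}
--     for r in rows:
--         bp = r.get("businessPartner")
--         if not bp:
--             continue
--         prev = by_bp.get(bp)
--
--         def score(row):
--             return (bool(row.get("cityName")), bool(row.get("country")))
--
--         if prev is None or score(r) > score(prev):
--             by_bp[bp] = r
--     return list(by_bp.values())
-- ===== SOURCE B (Python) =====
-- def _dedupe_addresses(rows):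
--     """Keep one address row per business partner (prefer rows with city populated)."""
--     groups = {}
--     for r in rows:
--         bp = r.get("businessPartner")
--         if not bp:
--             continue
--         groups.setdefault(bp, []).append(r)
--     return [
--         max(g, key=lambda row: (bool(row.get("cityName")), bool(row.get("country"))))
--         for g in groups.values()
--     ]
-- ===== Notes on version B (the rewrite author's own statement) =====
-- stated objective: alternative
-- what changed: Replaces the single-pass running-best dict with a group-then-reduce decomposition: first pass groups rows into per-partner lists (skipping falsy partners), second pass picks each group's maximum by (has city, has country), relying on max returning the first maximal element to reproduce the strict-greater earliest-wins rule.
import Mathlib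
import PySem

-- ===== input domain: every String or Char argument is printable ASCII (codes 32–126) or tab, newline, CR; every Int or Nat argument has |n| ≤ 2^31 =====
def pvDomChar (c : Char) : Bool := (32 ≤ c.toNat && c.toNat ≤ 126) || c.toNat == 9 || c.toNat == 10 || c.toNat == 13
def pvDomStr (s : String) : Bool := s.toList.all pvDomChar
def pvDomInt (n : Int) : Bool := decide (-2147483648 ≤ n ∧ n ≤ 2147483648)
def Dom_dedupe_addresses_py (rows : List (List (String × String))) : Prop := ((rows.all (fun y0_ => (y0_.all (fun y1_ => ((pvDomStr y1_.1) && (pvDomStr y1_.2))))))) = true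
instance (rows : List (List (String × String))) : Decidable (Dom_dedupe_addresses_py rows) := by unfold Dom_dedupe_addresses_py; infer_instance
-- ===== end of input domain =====

-- B replaces A's single running-best pass with a group-then-reduce decomposition (per-partner
-- lists, then max per group); objective: alternative (same cost, different structure).
-- Return-value equivalence only: neither program mutates its argument.

-- shared primitives: r.get(k) (first match) and Python truthiness of an Optional[str]
def pvGet (r : List (String × String)) (k : String) : Option String :=
  (r.find? (fun p => p.1 == k)).map (·.2)
def pvTruthy (o : Option String) : Bool :=
  match o with
  | some s => s != ""
  | none => false

-- ===== PORT A =====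
-- score(row) = (bool(row.get("cityName")), bool(row.get("country")))
def pvScoreA (r : List (String × String)) : Bool × Bool :=
  (pvTruthy (pvGet r "cityName"), pvTruthy (pvGet r "country"))

-- Python tuple-of-bool strict comparison score(r) > score(prev)
def pvGtA (a b : Bool × Bool) : Bool :=
  (a.1 && !b.1) || ((a.1 == b.1) && a.2 && !b.2)

def pvStepA (d : PySem.Dict String (List (String × String))) (r : List (String × String)) :
    PySem.Dict String (List (String × String)) :=
  match pvGet r "businessPartner" with
  | none => d                                -- not bp (missing)
  | some bp =>
    if bp == "" then d                       -- not bp (empty string)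
    else
      match d.get? bp with
      | none => d.insert bp r                -- prev is None
      | some prev => if pvGtA (pvScoreA r) (pvScoreA prev) then d.insert bp r else d

def dedupe_addresses_py (rows : List (List (String × String))) : List (List (String × String)) :=
  (rows.foldl pvStepA PySem.Dict.empty).values

-- ===== PORT B =====
-- groups.setdefault(bp, []).append(r): the in-place append makes groups[bp] = groups.get(bp, []) + [r],
-- which is exactly Dict.modify bp [] (· ++ [r])
def pvStepB (g : PySem.Dict String (List (List (String × String)))) (r : List (String × String)) :
    PySem.Dict String (List (List (String × String))) :=
  match pvGet r "businessPartner" with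
  | none => g
  | some bp => if bp == "" then g else g.modify bp [] (· ++ [r])

def dedupe_addresses_py_alt (rows : List (List (String × String))) : List (List (String × String)) :=
  ((rows.foldl pvStepB PySem.Dict.empty).values).map
    (fun g => (PySem.List.max2? g
        (fun row => pvTruthy (pvGet row "cityName"))
        (fun row => pvTruthy (pvGet row "country"))).getD [])

-- ===== PRECONDITION & SPEC =====
def Spec_dedupe_addresses_py (rows : List (List (String × String))) (out : List (List (String × String))) : Prop := out = dedupe_addresses_py_alt rows
instance (rows : List (List (String × String))) (out : List (List (String × String))) : Decidable (Spec_dedupe_addresses_py rows out) := by unfold Spec_dedupe_addresses_py; infer_instance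

-- ===== CLAIM (what is proved, stated in full; the proofs are below) =====
def Claim_equal_dedupe_addresses_py : Prop := ∀ (rows : List (List (String × String))), Dom_dedupe_addresses_py rows → Spec_dedupe_addresses_py rows (dedupe_addresses_py rows)

-- ===== LEMMAS AND PROOFS =====

-- A's running best over a nonempty group, as a function of the group list ([] is junk)
def pvBest (l : List (List (String × String))) : List (String × String) :=
  match l with
  | [] => []
  | x :: t => t.foldl (fun b r => if pvGtA (pvScoreA r) (pvScoreA b) then r else b) x

def pvFent (p : String × List (List (String × String))) : String × List (String × String) :=
  (p.1, pvBest p.2)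

-- the invariant tying A's dict to B's groups dict
def pvInv (d : PySem.Dict String (List (String × String)))
    (g : PySem.Dict String (List (List (String × String)))) : Prop :=
  d.items = g.items.map pvFent ∧ (∀ p ∈ g.items, p.2 ≠ []) ∧ g.keys.Nodup

-- max2?'s accumulator step, specialised to B's two keys
def pvMStep (acc : Option (List (String × String))) (y : List (String × String)) :
    Option (List (String × String)) :=
  match acc with
  | none => some y
  | some m =>
    if (decide ((pvScoreA m).1 < (pvScoreA y).1) ||
        (!decide ((pvScoreA y).1 < (pvScoreA m).1) && decide ((pvScoreA m).2 < (pvScoreA y).2))) = true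
    then some y else some m

theorem pvGt_eq_max2Cond (a b : Bool × Bool) :
    (decide (b.1 < a.1) || (!decide (a.1 < b.1) && decide (b.2 < a.2))) = pvGtA a b := by
  rcases a with ⟨a1, a2⟩; rcases b with ⟨b1, b2⟩; revert a1 a2 b1 b2; decide

theorem pv_opt_fold (t : List (List (String × String))) (x : List (String × String)) :
    t.foldl pvMStep (some x)
    = some (t.foldl (fun b r => if pvGtA (pvScoreA r) (pvScoreA b) then r else b) x) := by
  induction t generalizing x with
  | nil => rfl
  | cons y t ih =>
    rw [List.foldl_cons, List.foldl_cons]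
    have h1 : pvMStep (some x) y = some (if pvGtA (pvScoreA y) (pvScoreA x) then y else x) := by
      simp only [pvMStep]
      rw [pvGt_eq_max2Cond (pvScoreA y) (pvScoreA x)]
      cases pvGtA (pvScoreA y) (pvScoreA x) <;> simp
    rw [h1]
    cases pvGtA (pvScoreA y) (pvScoreA x) <;> simp only [Bool.false_eq_true, if_false, if_true] <;> exact ih _

theorem pv_max2_bridge (l : List (List (String × String))) :
    PySem.List.max2? l (fun row => pvTruthy (pvGet row "cityName"))
      (fun row => pvTruthy (pvGet row "country")) = l.foldl pvMStep none := by
  simp only [PySem.List.max2?]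
  apply PySem.List.foldl_congr_mem
  intro acc x _
  cases acc with
  | none => rfl
  | some m => rfl

theorem pv_max2_eq_best (l : List (List (String × String))) (hl : l ≠ []) :
    (PySem.List.max2? l
        (fun row => pvTruthy (pvGet row "cityName"))
        (fun row => pvTruthy (pvGet row "country"))).getD [] = pvBest l := by
  match l with
  | x :: t =>
    rw [pv_max2_bridge, List.foldl_cons]
    have h0 : pvMStep none x = some x := rfl
    rw [h0, pv_opt_fold]
    rfl

theorem pvBest_append (lst : List (List (String × String))) (r : List (String × String)) (h : lst ≠ []) :
    pvBest (lst ++ [r]) = if pvGtA (pvScoreA r) (pvScoreA (pvBest lst)) then r else pvBest lst := by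
  match lst with
  | x :: t => simp [pvBest, List.foldl_append]

-- lookup through the items relation
theorem pv_get?_rel (d : PySem.Dict String (List (String × String)))
    (g : PySem.Dict String (List (List (String × String))))
    (h : d.items = g.items.map pvFent) (k : String) :
    d.get? k = (g.get? k).map pvBest := by
  simp only [PySem.Dict.get?]
  rw [h, List.find?_map]
  have hp : ((fun p : String × List (String × String) => p.1 == k) ∘ pvFent)
      = (fun p : String × List (List (String × String)) => p.1 == k) := rfl
  rw [hp]
  cases g.items.find? (fun p => p.1 == k) with
  | none => rfl
  | some p => rfl

-- with Nodup keys, an items entry at key bp is THE entry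
theorem pv_uniq {β : Type} (l : List (String × β)) (h : (l.map (fun p => p.1)).Nodup)
    (bp : String) (lst : β) (hmem : (bp, lst) ∈ l) :
    ∀ p ∈ l, p.1 = bp → p = (bp, lst) := by
  intro p hp hpk
  exact List.inj_on_of_nodup_map h hp hmem (by simp [hpk])

theorem pv_step (d : PySem.Dict String (List (String × String)))
    (g : PySem.Dict String (List (List (String × String))))
    (r : List (String × String)) (h : pvInv d g) : pvInv (pvStepA d r) (pvStepB g r) := by
  obtain ⟨hitems, hne, hnd⟩ := h
  unfold pvStepA pvStepB
  cases hbp : pvGet r "businessPartner" with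
  | none => exact ⟨hitems, hne, hnd⟩
  | some bp =>
    cases hbe : (bp == "") with
    | true => simp only [hbe, if_true]; exact ⟨hitems, hne, hnd⟩
    | false =>
    simp only [hbe, Bool.false_eq_true, if_false]
    have hget := pv_get?_rel d g hitems bp
    have hcont : d.contains bp = g.contains bp := by
      rw [PySem.Dict.contains_eq_isSome_get?, PySem.Dict.contains_eq_isSome_get?, hget]
      cases g.get? bp <;> rfl
    rw [PySem.Dict.modify]
    cases hg : g.get? bp with
    | none =>
      have hdn : d.get? bp = none := by rw [hget, hg]; rfl
      have hgc : g.contains bp = false := by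
        rw [PySem.Dict.contains_eq_isSome_get?, hg]; rfl
      have hdc : d.contains bp = false := by rw [hcont, hgc]
      simp only [hdn]
      have hgetD : g.getD bp [] = [] := by
        rw [PySem.Dict.getD_eq_get?_getD, hg]; rfl
      rw [hgetD]
      simp only [List.nil_append]
      refine ⟨?_, ?_, ?_⟩
      · rw [PySem.Dict.items_insert_of_not_contains d r hdc,
            PySem.Dict.items_insert_of_not_contains g [r] hgc]
        simp [hitems, pvFent, pvBest]
      · intro p hp
        rw [PySem.Dict.items_insert_of_not_contains g [r] hgc] at hp
        rcases List.mem_append.mp hp with h1 | h1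
        · exact hne p h1
        · simp at h1; subst h1; simp
      · exact PySem.Dict.nodup_keys_insert _ _ _ hnd
    | some lst =>
      have hdg : d.get? bp = some (pvBest lst) := by rw [hget, hg]; rfl
      have hgc : g.contains bp = true := by
        rw [PySem.Dict.contains_eq_isSome_get?, hg]; rfl
      have hdc : d.contains bp = true := by rw [hcont, hgc]
      have hmem : (bp, lst) ∈ g.items := PySem.Dict.mem_items_of_get?_eq_some g hg
      have hlst : lst ≠ [] := hne _ hmem
      have hgetD : g.getD bp [] = lst := by
        rw [PySem.Dict.getD_eq_get?_getD, hg]; rfl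
      simp only [hdg, hgetD]
      have hnd' : (g.items.map (fun p => p.1)).Nodup := hnd
      have huniq := pv_uniq g.items hnd' bp lst hmem
      have hitems2 : (g.insert bp (lst ++ [r])).items
          = g.items.map (fun p => if (p.1 == bp) = true then (bp, lst ++ [r]) else p) :=
        PySem.Dict.items_insert_of_contains g (lst ++ [r]) hgc
      have hIns : ∀ p ∈ (g.insert bp (lst ++ [r])).items, p.2 ≠ [] := by
        intro p hp
        rw [hitems2] at hp
        rcases List.mem_map.mp hp with ⟨q, hq, hqe⟩
        by_cases hk : (q.1 == bp) = true
        · simp only [hk, if_true] at hqe; rw [← hqe]; simp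
        · simp only [hk, Bool.false_eq_true, if_false] at hqe; rw [← hqe]; exact hne q hq
      have hNd : (g.insert bp (lst ++ [r])).keys.Nodup := PySem.Dict.nodup_keys_insert _ _ _ hnd
      cases hgt : pvGtA (pvScoreA r) (pvScoreA (pvBest lst)) with
      | true =>
        simp only [if_true]
        refine ⟨?_, hIns, hNd⟩
        rw [PySem.Dict.items_insert_of_contains d r hdc, hitems2, hitems,
            List.map_map, List.map_map]
        apply List.map_congr_left
        intro p hp
        by_cases hk : (p.1 == bp) = true
        · simp only [Function.comp, pvFent, hk, if_true]
          rw [pvBest_append lst r hlst, hgt]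
          simp
        · simp [Function.comp, pvFent, hk]
      | false =>
        simp only [Bool.false_eq_true, if_false]
        refine ⟨?_, hIns, hNd⟩
        rw [hitems2, hitems, List.map_map]
        apply List.map_congr_left
        intro p hp
        by_cases hk : (p.1 == bp) = true
        · have hpk : p.1 = bp := by simpa using hk
          have hpe : p = (bp, lst) := huniq p hp hpk
          subst hpe
          simp only [Function.comp, pvFent, hk, if_true]
          rw [pvBest_append lst r hlst, hgt]
          simp
        · simp [Function.comp, pvFent, hk]

theorem pv_fold (rows : List (List (String × String)))
    (d : PySem.Dict String (List (String × String)))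
    (g : PySem.Dict String (List (List (String × String))))
    (h : pvInv d g) : pvInv (rows.foldl pvStepA d) (rows.foldl pvStepB g) := by
  induction rows generalizing d g with
  | nil => exact h
  | cons r t ih => exact ih _ _ (pv_step d g r h)

-- ===== VERDICT (by name: the statement is the Claim_ definition above) =====
theorem dedupe_addresses_py_spec : Claim_equal_dedupe_addresses_py := by
  intro rows _
  have h0 : pvInv PySem.Dict.empty PySem.Dict.empty := by
    refine ⟨rfl, ?_, ?_⟩ <;> simp [PySem.Dict.empty, PySem.Dict.keys]
  obtain ⟨hitems, hne, _⟩ := pv_fold rows _ _ h0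
  show dedupe_addresses_py rows = dedupe_addresses_py_alt rows
  unfold dedupe_addresses_py dedupe_addresses_py_alt
  rw [PySem.Dict.values, PySem.Dict.values, hitems, List.map_map, List.map_map]
  apply List.map_congr_left
  intro p hp
  simp only [Function.comp]
  exact (pv_max2_eq_best p.2 (hne p hp)).symm
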